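-- pv_equiv track=rewrite | github.com/OCA/bank-statement-import | account_bank_statement_import_mt940_ro_brd/mt940.py | get_subfields
-- ===== SOURCE A (Python) =====
-- def get_subfields(data, codewords):
--     """Return dictionary with value array for each codeword in data.
--
--     For instance:
--     data =
--         000+20TRANSACTIONTYPE+30BANKTRANSACTIONNUMBER+31PARTNERBANKACCOUNT
--         +32PARTNER+33CUI/CNPTIN
--         +23TRANSACTIONMESSAGE1+24TRANSACTIONMESSAGE2
--         +25TRANSACTIONMESSAGE3+26TRANSACTIONMESSAGE4
--         +27TRANSACTIONMESSAGE5
--         +61PARTNERADDRESS1+62PARTNERADDRESS2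
--     codewords = ['20', '23', '24', '25', '26', '27',
--                  '30', '31', '32', '33', '61', '62']
--     !!! NOT ALL CODEWORDS ARE PRESENT !!!
--     Then return subfields = {
--         '20': [TRANSACTIONTYPE],
--         '30': [BANKTRANSACTIONNUMBER],
--         '31': [PARTNERBANKACCOUNT],
--         '32': [PARTNER],
--         '33': [TIN],
--         '23': [TRANSACTIONMESSAGE1],
--         '24': [TRANSACTIONMESSAGE2],
--         '25': [TRANSACTIONMESSAGE3],
--         '26': [TRANSACTIONMESSAGE4],
--         '27': [TRANSACTIONMESSAGE5],
--         '61': [PARTNERADDRESS1],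
--         '62': [PARTNERADDRESS2],
--     }
--     """
--     subfields = {}
--     current_codeword = None
--     for word in data.split('+'):
--         if not word and not current_codeword:
--             continue
--         if word[:2] in codewords:
--             current_codeword = word[:2]
--             subfields[current_codeword] = [word[2:]]
--             continue
--         if current_codeword in subfields:
--             subfields[current_codeword].append(word[2:])
--     return subfields
-- ===== SOURCE B (Python) =====
-- def get_subfields(data, codewords):
--     """Group-at-a-time re-implementation: instead of a one-token state machine
--     with a current_codeword register, cut the token list into whole groups."""
--     toks = data.split('+')
--     # drop leading tokens that start with no codeword
--     while toks and toks[0][:2] not in codewords: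
--         toks = toks[1:]
--     subfields = {}
--     while toks:
--         head, rest = toks[0], toks[1:]
--         n = 0
--         while n < len(rest) and rest[n][:2] not in codewords:
--             n += 1
--         subfields[head[:2]] = [head[2:]] + [t[2:] for t in rest[:n]]
--         toks = rest[n:]
--     return subfields
-- ===== Notes on version B (the rewrite author's own statement) =====
-- stated objective: alternative
-- what changed: Replaces A's one-pass state machine (a current_codeword register with per-word in-place dict appends) by dropping the pre-codeword prefix and cutting the token list into whole codeword groups, inserting each group at once; Pre_ excludes codeword lists containing the empty string, on which A's falsy test 'not current_codeword' conflates the empty codeword with 'no codeword yet' and its grouping of empty tokens is accidental.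
-- outside the precondition, e.g. on get_subfields('ab++a+', ['ab', '']): A returns {'ab': [''], '': ['', '']}, B returns {'ab': [''], '': ['']}
import Mathlib
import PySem

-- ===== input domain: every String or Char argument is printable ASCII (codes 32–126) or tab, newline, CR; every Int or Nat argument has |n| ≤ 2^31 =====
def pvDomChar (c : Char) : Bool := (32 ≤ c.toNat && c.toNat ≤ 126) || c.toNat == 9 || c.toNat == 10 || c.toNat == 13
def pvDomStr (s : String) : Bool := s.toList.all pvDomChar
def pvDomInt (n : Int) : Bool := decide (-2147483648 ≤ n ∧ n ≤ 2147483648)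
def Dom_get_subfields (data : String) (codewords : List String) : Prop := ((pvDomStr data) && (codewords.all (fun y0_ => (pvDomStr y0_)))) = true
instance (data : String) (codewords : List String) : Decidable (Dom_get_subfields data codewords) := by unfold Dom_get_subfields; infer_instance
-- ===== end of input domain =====

-- B replaces A's one-token state machine (current_codeword register + in-place append)
-- by cutting the token list into whole codeword groups; objective: alternative decomposition,
-- same cost. Equivalence is about the return value (neither side mutates its arguments).

-- word[:2] / word[2:] (shared literal slices)
def pre2 (w : String) : String := PySem.Str.slice w none (some 2)
def tl2 (w : String) : String := PySem.Str.slice w (some 2) none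

-- ===== PORT A =====
-- loop body of A, one word at a time over state (subfields, current_codeword)
def astep (codewords : List String) (st : PySem.Dict String (List String) × Option String)
    (word : String) : PySem.Dict String (List String) × Option String :=
  if word = "" ∧ (st.2 = none ∨ st.2 = some "") then st   -- 'not current_codeword': None or ''
  else if pre2 word ∈ codewords then
    (st.1.insert (pre2 word) [tl2 word], some (pre2 word))
  else
    match st.2 with
    | none => st          -- 'None in subfields' is False
    | some c => if st.1.contains c then (st.1.modify c [] (fun v => v ++ [tl2 word]), some c) else st

def get_subfields (data : String) (codewords : List String) : List (String × List String) :=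
  (((PySem.Str.split? data "+").getD []).foldl (astep codewords) (PySem.Dict.empty, none)).1.items

-- ===== PORT B =====
-- not-a-boundary test: t[:2] not in codewords
def nb (codewords : List String) (t : String) : Bool := decide (pre2 t ∉ codewords)

-- B's outer while: the inner counting loop 'n += 1 while rest[n] is no boundary' plus the
-- slices rest[:n] / rest[n:] are ported exactly as takeWhile / dropWhile of that test.
def bgroups (codewords : List String) : List String → PySem.Dict String (List String) → PySem.Dict String (List String)
  | [], d => d
  | t :: ts, d =>
      bgroups codewords (ts.dropWhile (nb codewords))
        (d.insert (pre2 t) (tl2 t :: (ts.takeWhile (nb codewords)).map tl2))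
termination_by l _ => l.length
decreasing_by exact Nat.lt_succ_of_le (ts.length_dropWhile_le _)

def get_subfields_alt (data : String) (codewords : List String) : List (String × List String) :=
  (bgroups codewords (((PySem.Str.split? data "+").getD []).dropWhile (nb codewords)) PySem.Dict.empty).items

-- ===== PRECONDITION & SPEC =====
-- Pre_ excludes codeword lists containing the empty string: there A's falsy test
-- 'not current_codeword' conflates the empty codeword with "no codeword yet", so empty
-- tokens are sometimes skipped and sometimes open a group — an accident of the
-- implementation no caller (MT940 codewords are two characters) would specify.
def Pre_get_subfields (data : String) (codewords : List String) : Prop := "" ∉ codewords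
instance (data : String) (codewords : List String) : Decidable (Pre_get_subfields data codewords) := by unfold Pre_get_subfields; infer_instance

def pvWitness_get_subfields : String × List String := ("20TYPE+30NUM+junk+32PARTNER+ADDR", ["20", "30", "32"])

def Spec_get_subfields (data : String) (codewords : List String) (out : List (String × List String)) : Prop := out = get_subfields_alt data codewords
instance (data : String) (codewords : List String) (out : List (String × List String)) : Decidable (Spec_get_subfields data codewords out) := by unfold Spec_get_subfields; infer_instance

-- ===== CLAIM (what is proved, stated in full; the proofs are below) =====
def Claim_equal_get_subfields : Prop := ∀ (data : String) (codewords : List String), Dom_get_subfields data codewords → Pre_get_subfields data codewords → Spec_get_subfields data codewords (get_subfields data codewords)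

-- ===== LEMMAS AND PROOFS =====

-- words before the first codeword are skipped by A's fold from the initial state
theorem foldl_astep_dropWhile (codewords : List String) (ws : List String) :
    ws.foldl (astep codewords) (PySem.Dict.empty, none)
      = (ws.dropWhile (nb codewords)).foldl (astep codewords) (PySem.Dict.empty, none) := by
  induction ws with
  | nil => rfl
  | cons t ts ih =>
    by_cases hb : pre2 t ∈ codewords
    · simp [nb, hb]
    · have hstep : astep codewords (PySem.Dict.empty, none) t = (PySem.Dict.empty, none) := by
        by_cases ht : t = "" <;> simp [astep, ht, hb]
      simp [nb, hb, List.foldl_cons, hstep, ih]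

-- once a group is open (current codeword k, freshly holding list g), A's fold builds the
-- same dictionary as B's group-at-a-time recursion
theorem foldl_astep_eq_bgroups (codewords : List String) (hcw : "" ∉ codewords) (ws : List String) :
    ∀ (d : PySem.Dict String (List String)) (k : String) (g : List String), k ≠ "" →
    (ws.foldl (astep codewords) (d.insert k g, some k)).1
      = bgroups codewords (ws.dropWhile (nb codewords))
          (d.insert k (g ++ (ws.takeWhile (nb codewords)).map tl2)) := by
  induction ws with
  | nil => intro d k g _; simp [bgroups]
  | cons t ts ih =>
    intro d k g hk
    have hpt : pre2 t ∈ codewords → pre2 t ≠ "" := fun h he => hcw (he ▸ h)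
    by_cases hb : pre2 t ∈ codewords
    · have hstep : astep codewords (d.insert k g, some k) t
          = ((d.insert k g).insert (pre2 t) [tl2 t], some (pre2 t)) := by
        simp [astep, hb, hk]
      rw [List.foldl_cons, hstep, ih _ _ _ (hpt hb)]
      have hdw : (t :: ts).dropWhile (nb codewords) = t :: ts := by
        simp [nb, hb]
      have htw : (t :: ts).takeWhile (nb codewords) = [] := by
        simp [nb, hb]
      rw [hdw, htw]
      simp [bgroups]
    · have hstep : astep codewords (d.insert k g, some k) t
          = (d.insert k (g ++ [tl2 t]), some k) := by
        simp only [astep]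
        rw [if_neg (by simp [hk]), if_neg (by simp [hb])]
        simp only [PySem.Dict.contains_insert_self, PySem.Dict.modify,
          PySem.Dict.getD_insert_self, PySem.Dict.insert_insert_self]
        simp
      rw [List.foldl_cons, hstep, ih _ _ _ hk]
      have hdw : (t :: ts).dropWhile (nb codewords) = ts.dropWhile (nb codewords) := by
        simp [nb, hb]
      have htw : (t :: ts).takeWhile (nb codewords) = t :: ts.takeWhile (nb codewords) := by
        simp [nb, hb]
      rw [hdw, htw]
      simp

-- ===== VERDICT (by name: the statement is the Claim_ definition above) =====
theorem get_subfields_spec : Claim_equal_get_subfields := by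
  intro data codewords _ hpre
  show _ = _
  unfold get_subfields get_subfields_alt
  rw [foldl_astep_dropWhile]
  cases hws : ((PySem.Str.split? data "+").getD []).dropWhile (nb codewords) with
  | nil => simp [bgroups]
  | cons t ts =>
    have hb : pre2 t ∈ codewords := by
      have h := List.head?_dropWhile_not (nb codewords) ((PySem.Str.split? data "+").getD [])
      rw [hws] at h
      simpa [nb] using h
    have ht : t ≠ "" := by
      intro h
      subst h
      exact hpre (by
        have h2 : pre2 "" = "" := rfl
        rwa [h2] at hb)
    have hstep : astep codewords (PySem.Dict.empty, none) t
        = (PySem.Dict.empty.insert (pre2 t) [tl2 t], some (pre2 t)) := by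
      simp [astep, ht, hb]
    rw [List.foldl_cons, hstep, foldl_astep_eq_bgroups codewords hpre _ _ _ _ (fun he => hpre (he ▸ hb))]
    simp [bgroups]
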